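-- pv_equiv track=rewrite | github.com/nour-bouchouchi/M1-IAMSI | TME_4/championnat.py | dico
-- ===== SOURCE A (Python) =====
-- def codage(ne, nj, j, x, y):
-- 	return j*ne**2 + x*ne + y + 1
--
-- def dico(ne,nj):
--     """
--     Permet de faire correspondre un nombre entre 1 et nb_var avec l'encodage effectué par la fonction encodage.
--     """
--     dico_res = dict() #dictionnaire : (val pour glucose,encodage)
--     dico_res2 = dict() #dictionanire : (encodage, valeur pour glucose)
--     nb_var = nj*ne*(ne-1)
--     liste = [] #contiendra toutes les valeurs possibles d'encodage
--     for j in range(nj):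
--           for x in range(ne):
--                 for y in range(ne):
--                     if x!=y :
--                         liste.append(codage(ne,nj,j,x,y))
--     dico_res = {i+1:liste[i] for i in range(len(liste))} #on fait correspondre un nombre entre 1 et nb_val à chaque valeur d'encodage
--     dico_res2 = {liste[i]:i+1 for i in range(len(liste))}
--     dico_res_neg = {-i-1:-liste[i] for i in range(len(liste))} #on fait de même pour les nombres négatifs
--     dico_res_neg2 = {-liste[i]:-i-1 for i in range(len(liste))}
--     dico_res.update(dico_res_neg)
--     dico_res2.update(dico_res_neg2)
--     dico_res[0]=0
--     dico_res2[0]=0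
--     return dico_res, dico_res2
-- ===== SOURCE B (Python) =====
-- def dico(ne, nj):
--     """Closed form: the k-th variable's encoding is obtained directly by rank
--     decoding (integer division), with no triple (j, x, y) loop and no x != y filter."""
--     m = ne if ne > 0 else 0
--     per = m * (m - 1)
--     n = (nj if nj > 0 else 0) * per
--     dico_res = {}
--     dico_res2 = {}
--     for k in range(1, n + 1):
--         c = _code_of_rank(ne, per, k)
--         dico_res[k] = c
--         dico_res2[c] = k
--     for k in range(1, n + 1):
--         c = _code_of_rank(ne, per, k)
--         dico_res[-k] = -c
--         dico_res2[-c] = -k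
--     dico_res[0] = 0
--     dico_res2[0] = 0
--     return dico_res, dico_res2
--
-- def _code_of_rank(ne, per, k):
--     j = (k - 1) // per
--     r = (k - 1) % per
--     x = r // (ne - 1)
--     yp = r % (ne - 1)
--     y = yp if yp < x else yp + 1
--     return j * ne * ne + x * ne + y + 1
-- ===== Notes on version B (the rewrite author's own statement) =====
-- stated objective: alternative
-- what changed: B replaces A's triple (j,x,y) enumeration with x!=y filtering and the intermediate liste entirely: each variable's encoding is computed in closed form from its rank k by integer division/remainder (rank decoding), so no pair enumeration, no filter and no materialised list exist.
import Mathlib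
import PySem

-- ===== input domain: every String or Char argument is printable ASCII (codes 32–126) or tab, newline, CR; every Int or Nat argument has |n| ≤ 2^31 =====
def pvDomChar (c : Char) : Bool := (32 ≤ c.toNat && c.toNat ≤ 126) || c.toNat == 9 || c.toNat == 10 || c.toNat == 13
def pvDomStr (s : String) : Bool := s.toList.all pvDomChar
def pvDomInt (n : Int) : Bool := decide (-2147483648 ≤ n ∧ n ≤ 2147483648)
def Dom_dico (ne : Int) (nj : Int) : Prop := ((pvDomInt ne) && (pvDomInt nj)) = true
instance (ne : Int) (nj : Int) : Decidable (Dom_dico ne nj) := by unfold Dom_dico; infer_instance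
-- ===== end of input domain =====

-- B replaces A's triple (j,x,y) enumeration + intermediate list + four comprehensions by a
-- closed-form rank decoding: the k-th encoding is computed by integer division (alternative).

-- shared module helper (used by Python A)
def codage (ne nj j x y : Int) : Int := j * ne ^ 2 + x * ne + y + 1

-- ===== PORT A =====
def dico (ne : Int) (nj : Int) : (List (Int × Int)) × (List (Int × Int)) :=
  let _nb_var := nj * ne * (ne - 1)
  let liste : List Int :=
    (PySem.List.pyRange 0 nj).foldl (fun acc j =>
      (PySem.List.pyRange 0 ne).foldl (fun acc x =>
        (PySem.List.pyRange 0 ne).foldl (fun acc y =>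
          if x ≠ y then acc ++ [codage ne nj j x y] else acc) acc) acc) []
  let n : Int := (liste.length : Int)
  let dico_res : PySem.Dict Int Int :=
    (PySem.List.pyRange 0 n).foldl
      (fun d i => d.insert (i + 1) (PySem.List.pyGetD liste i 0)) PySem.Dict.empty
  let dico_res2 : PySem.Dict Int Int :=
    (PySem.List.pyRange 0 n).foldl
      (fun d i => d.insert (PySem.List.pyGetD liste i 0) (i + 1)) PySem.Dict.empty
  let dico_res_neg : PySem.Dict Int Int :=
    (PySem.List.pyRange 0 n).foldl
      (fun d i => d.insert (-i - 1) (-(PySem.List.pyGetD liste i 0))) PySem.Dict.empty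
  let dico_res_neg2 : PySem.Dict Int Int :=
    (PySem.List.pyRange 0 n).foldl
      (fun d i => d.insert (-(PySem.List.pyGetD liste i 0)) (-i - 1)) PySem.Dict.empty
  let dico_res := dico_res.update dico_res_neg.items
  let dico_res2 := dico_res2.update dico_res_neg2.items
  let dico_res := dico_res.insert 0 0
  let dico_res2 := dico_res2.insert 0 0
  (dico_res.items, dico_res2.items)

-- ===== PORT B =====
-- Source B helper _code_of_rank: closed-form decoding of the k-th encoding
def code_of_rank (ne per k : Int) : Int :=
  let j := PySem.Int.floordiv (k - 1) per
  let r := PySem.Int.mod (k - 1) per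
  let x := PySem.Int.floordiv r (ne - 1)
  let yp := PySem.Int.mod r (ne - 1)
  let y := if yp < x then yp else yp + 1
  j * ne * ne + x * ne + y + 1

def dico_alt (ne : Int) (nj : Int) : (List (Int × Int)) × (List (Int × Int)) :=
  let m : Int := if 0 < ne then ne else 0
  let per : Int := m * (m - 1)
  let n : Int := (if 0 < nj then nj else 0) * per
  let s :=
    (PySem.List.pyRange 1 (n + 1)).foldl (fun (s : PySem.Dict Int Int × PySem.Dict Int Int) k =>
      let c := code_of_rank ne per k
      (s.1.insert k c, s.2.insert c k))
      ((PySem.Dict.empty : PySem.Dict Int Int), (PySem.Dict.empty : PySem.Dict Int Int))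
  let s :=
    (PySem.List.pyRange 1 (n + 1)).foldl (fun (s : PySem.Dict Int Int × PySem.Dict Int Int) k =>
      let c := code_of_rank ne per k
      (s.1.insert (-k) (-c), s.2.insert (-c) (-k))) s
  ((s.1.insert 0 0).items, (s.2.insert 0 0).items)

-- ===== PRECONDITION & SPEC =====
def Spec_dico (ne : Int) (nj : Int) (out : (List (Int × Int)) × (List (Int × Int))) : Prop := out = dico_alt ne nj
instance (ne : Int) (nj : Int) (out : (List (Int × Int)) × (List (Int × Int))) : Decidable (Spec_dico ne nj out) := by unfold Spec_dico; infer_instance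

-- ===== CLAIM (what is proved, stated in full; the proofs are below) =====
def Claim_equal_dico : Prop := ∀ (ne : Int) (nj : Int), Dom_dico ne nj → Spec_dico ne nj (dico ne nj)

-- ===== LEMMAS AND PROOFS =====

-- the list of encodings A materialises, in generation order
def pvSeg (ne nj j x : Int) : List Int :=
  ((PySem.List.pyRange 0 ne).filter (fun y => decide (x ≠ y))).map (fun y => codage ne nj j x y)

def pvL (ne nj : Int) : List Int :=
  (PySem.List.pyRange 0 nj).flatMap (fun j => (PySem.List.pyRange 0 ne).flatMap (fun x => pvSeg ne nj j x))

-- B's clamped per-block size and total count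
def pvPer (ne : Int) : Int := (if 0 < ne then ne else 0) * ((if 0 < ne then ne else 0) - 1)
def pvN (ne nj : Int) : Int := (if 0 < nj then nj else 0) * pvPer ne

-- (index, value) pairs of L with indices starting at i
def pvPairs (i : Int) : List Int → List (Int × Int)
  | [] => []
  | c :: L => (i, c) :: pvPairs (i + 1) L

-- both triple loops are a fold over pvL
lemma pvFuse (ne nj : Int) {σ : Type} (g : σ → Int → σ) (init : σ) :
    (PySem.List.pyRange 0 nj).foldl (fun s j =>
      (PySem.List.pyRange 0 ne).foldl (fun s x =>
        (PySem.List.pyRange 0 ne).foldl (fun s y =>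
          if x ≠ y then g s (codage ne nj j x y) else s) s) s) init
    = (pvL ne nj).foldl g init := by
  unfold pvL
  rw [List.foldl_flatMap]
  apply PySem.List.foldl_congr_mem
  intro acc j _
  rw [List.foldl_flatMap]
  apply PySem.List.foldl_congr_mem
  intro acc x _
  unfold pvSeg
  rw [List.foldl_map,
    PySem.List.foldl_ite_eq_foldl_filter (p := fun y => x ≠ y)
      (f := fun s y => g s (codage ne nj j x y))]

lemma pvPairs_append (L : List Int) (c : Int) : ∀ i : Int,
    pvPairs i (L ++ [c]) = pvPairs i L ++ [(i + L.length, c)] := by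
  induction L with
  | nil => intro i; simp [pvPairs]
  | cons a L ih =>
      intro i
      simp only [List.cons_append, pvPairs, ih, List.length_cons]
      push_cast
      ring_nf

lemma pvPairs_shift (L : List Int) : ∀ i : Int,
    pvPairs (i + 1) L = (pvPairs i L).map (fun p => (p.1 + 1, p.2)) := by
  induction L with
  | nil => intro i; simp [pvPairs]
  | cons a L ih => intro i; simp [pvPairs, ih]

lemma pvPairs_fst (L : List Int) : ∀ i : Int,
    (pvPairs i L).map Prod.fst = PySem.List.pyRange i (i + L.length) := by
  induction L with
  | nil => intro i; simp [pvPairs, PySem.List.pyRange_one_eq_nil]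
  | cons a L ih =>
      intro i
      rw [PySem.List.pyRange_one_cons (by simp)]
      simp only [pvPairs, List.map_cons, ih, List.length_cons]
      congr 2
      push_cast
      ring

lemma pvPairs_snd (L : List Int) : ∀ i : Int, (pvPairs i L).map Prod.snd = L := by
  induction L with
  | nil => intro i; simp [pvPairs]
  | cons a L ih => intro i; simp [pvPairs, ih]

-- A's index-over-range comprehension is a fold over the (index, value) pairs
lemma pvIdxFold (kf vf : Int → Int → Int) (L : List Int) :
    ∀ d : PySem.Dict Int Int,
    (PySem.List.pyRange 0 (L.length : Int)).foldl
        (fun d i => d.insert (kf i (PySem.List.pyGetD L i 0)) (vf i (PySem.List.pyGetD L i 0))) d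
    = (pvPairs 0 L).foldl (fun d p => d.insert (kf p.1 p.2) (vf p.1 p.2)) d := by
  induction L using List.reverseRecOn with
  | nil => intro d; simp [pvPairs, PySem.List.pyRange_one_eq_nil]
  | append_singleton L c ih =>
      intro d
      have hlen : ((L ++ [c]).length : Int) = (L.length : Int) + 1 := by
        simp
      rw [hlen, PySem.List.pyRange_one_succ_right (by positivity), List.foldl_append,
        pvPairs_append, List.foldl_append]
      have hsame : ∀ (d : PySem.Dict Int Int),
          (PySem.List.pyRange 0 (L.length : Int)).foldl
            (fun d i => d.insert (kf i (PySem.List.pyGetD (L ++ [c]) i 0))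
                                 (vf i (PySem.List.pyGetD (L ++ [c]) i 0))) d
          = (PySem.List.pyRange 0 (L.length : Int)).foldl
            (fun d i => d.insert (kf i (PySem.List.pyGetD L i 0))
                                 (vf i (PySem.List.pyGetD L i 0))) d := by
        intro d
        apply PySem.List.foldl_congr_mem
        intro acc i hi
        rw [PySem.List.mem_pyRange_one] at hi
        have h1 : i < (L.length : Int) := hi.2
        rw [PySem.List.pyGetD_eq_getElem (L ++ [c]) 0 hi.1 (by simp; omega),
          PySem.List.pyGetD_eq_getElem L 0 hi.1 h1,
          List.getElem_append_left (by omega)]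
      rw [hsame, ih]
      have hget : PySem.List.pyGetD (L ++ [c]) (L.length : Int) 0 = c := by
        rw [PySem.List.pyGetD_eq_getElem (L ++ [c]) 0 (by positivity) (by simp)]
        simp
      simp [hget]

-- the produced encodings are strictly increasing, hence distinct
lemma pvSeg_bounds {ne nj j x c : Int} (h : c ∈ pvSeg ne nj j x) :
    j * ne ^ 2 + x * ne + 1 ≤ c ∧ c ≤ j * ne ^ 2 + x * ne + ne := by
  unfold pvSeg at h
  simp only [List.mem_map, List.mem_filter, PySem.List.mem_pyRange_one] at h
  obtain ⟨y, ⟨⟨hy0, hy1⟩, _⟩, rfl⟩ := h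
  unfold codage
  constructor <;> linarith

lemma pvBlock_bounds {ne nj j c : Int}
    (h : c ∈ (PySem.List.pyRange 0 ne).flatMap (fun x => pvSeg ne nj j x)) :
    j * ne ^ 2 + 1 ≤ c ∧ c ≤ (j + 1) * ne ^ 2 := by
  simp only [List.mem_flatMap, PySem.List.mem_pyRange_one] at h
  obtain ⟨x, hx, hc⟩ := h
  have hb := pvSeg_bounds hc
  have h1 : 0 ≤ x * ne := mul_nonneg hx.1 (by linarith [hx.2, hx.1])
  have h2 : (x + 1) * ne ≤ ne * ne := by
    apply mul_le_mul_of_nonneg_right (by omega) (by linarith [hx.2, hx.1])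
  constructor
  · linarith
  · have : x * ne + ne ≤ ne ^ 2 := by nlinarith
    nlinarith [hb.2]

lemma pvSeg_pairwise (ne nj j x : Int) : (pvSeg ne nj j x).Pairwise (· < ·) := by
  unfold pvSeg
  rw [List.pairwise_map]
  refine (List.Pairwise.sublist List.filter_sublist (PySem.List.pairwise_lt_pyRange_one 0 ne)).imp ?_
  intro a b hab
  unfold codage
  linarith

lemma pvL_nodup (ne nj : Int) : (pvL ne nj).Nodup := by
  have hpw : (pvL ne nj).Pairwise (· < ·) := by
    unfold pvL
    rw [List.pairwise_flatMap]
    constructor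
    · intro j _
      rw [List.pairwise_flatMap]
      constructor
      · intro x _
        exact pvSeg_pairwise ne nj j x
      · refine (PySem.List.pairwise_lt_pyRange_one 0 ne).imp_of_mem ?_
        intro x x' hx hx' _ c hc c' hc'
        have h1 := pvSeg_bounds hc
        have h2 := pvSeg_bounds hc'
        have hne : 0 < ne := by
          have := (PySem.List.mem_pyRange_one.mp hx).2
          have := (PySem.List.mem_pyRange_one.mp hx).1
          omega
        have : (x + 1) * ne ≤ x' * ne := mul_le_mul_of_nonneg_right (by omega) (by omega)
        nlinarith [h1.2, h2.1]
    · refine (PySem.List.pairwise_lt_pyRange_one 0 nj).imp_of_mem ?_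
      intro j j' _ _ hlt c hc c' hc'
      have h1 := pvBlock_bounds (ne := ne) (nj := nj) hc
      have h2 := pvBlock_bounds (ne := ne) (nj := nj) hc'
      have hsq : 0 ≤ ne ^ 2 := sq_nonneg ne
      have : (j + 1) * ne ^ 2 ≤ j' * ne ^ 2 := mul_le_mul_of_nonneg_right (by omega) hsq
      nlinarith [h1.2, h2.1]
  exact hpw.imp ne_of_lt

-- canonical form both ports reduce to
def pvD1pos (L : List Int) : PySem.Dict Int Int :=
  (pvPairs 0 L).foldl (fun d p => d.insert (p.1 + 1) p.2) PySem.Dict.empty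
def pvD2pos (L : List Int) : PySem.Dict Int Int :=
  (pvPairs 0 L).foldl (fun d p => d.insert p.2 (p.1 + 1)) PySem.Dict.empty
def pvC1 (L : List Int) : List (Int × Int) :=
  (((pvPairs 0 L).foldl (fun d p => d.insert (-p.1 - 1) (-p.2)) (pvD1pos L)).insert 0 0).items
def pvC2 (L : List Int) : List (Int × Int) :=
  (((pvPairs 0 L).foldl (fun d p => d.insert (-p.2) (-p.1 - 1)) (pvD2pos L)).insert 0 0).items

lemma dico_eq (ne nj : Int) : dico ne nj = (pvC1 (pvL ne nj), pvC2 (pvL ne nj)) := by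
  unfold dico
  dsimp only
  rw [pvFuse ne nj (g := fun acc c => acc ++ [c]) (init := ([] : List Int)),
    PySem.List.foldl_append_singleton_eq_self, List.nil_append]
  rw [pvIdxFold (kf := fun i _ => i + 1) (vf := fun _ v => v),
    pvIdxFold (kf := fun _ v => v) (vf := fun i _ => i + 1),
    pvIdxFold (kf := fun i _ => -i - 1) (vf := fun _ v => -v),
    pvIdxFold (kf := fun _ v => -v) (vf := fun i _ => -i - 1)]
  have hnd1 : ((pvPairs 0 (pvL ne nj)).map (fun p => -p.1 - 1)).Nodup := by
    have h : (pvPairs 0 (pvL ne nj)).map (fun p => -p.1 - 1)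
        = ((pvPairs 0 (pvL ne nj)).map Prod.fst).map (fun t => -t - 1) := by
      rw [List.map_map]; rfl
    rw [h, pvPairs_fst]
    exact List.Nodup.map (fun a b hab => by omega) (PySem.List.nodup_pyRange_one _ _)
  have hnd2 : ((pvPairs 0 (pvL ne nj)).map (fun p => -p.2)).Nodup := by
    have h : (pvPairs 0 (pvL ne nj)).map (fun p => -p.2)
        = ((pvPairs 0 (pvL ne nj)).map Prod.snd).map (fun t => -t) := by
      rw [List.map_map]; rfl
    rw [h, pvPairs_snd]
    exact List.Nodup.map (fun a b hab => by omega) (pvL_nodup ne nj)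
  rw [PySem.Dict.items_foldl_insert_fresh (pvPairs 0 (pvL ne nj))
      (fun p => -p.1 - 1) (fun p => -p.2) PySem.Dict.empty
      (fun a _ => PySem.Dict.contains_empty _) hnd1,
    PySem.Dict.items_foldl_insert_fresh (pvPairs 0 (pvL ne nj))
      (fun p => -p.2) (fun p => -p.1 - 1) PySem.Dict.empty
      (fun a _ => PySem.Dict.contains_empty _) hnd2]
  simp only [PySem.Dict.update, show (PySem.Dict.empty : PySem.Dict Int Int).items = [] from rfl,
    List.nil_append, List.foldl_map]
  unfold pvC1 pvC2 pvD1pos pvD2pos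
  rfl

-- ---- B-side: closed form equals the enumeration ----

-- shifting a range
lemma pvRange_shift (a b c : Int) :
    (PySem.List.pyRange a b).map (fun t => t + c) = PySem.List.pyRange (a + c) (b + c) := by
  rw [PySem.List.pyRange_one, PySem.List.pyRange_one, List.map_map]
  rw [show b + c - (a + c) = b - a by ring]
  apply List.map_congr_left
  intro k _
  simp [Function.comp]
  ring

-- flattening two nested ranges into one range with divmod decoding
lemma pvFlatRange (g : Int → Int → Int) (b : Int) (hb : 0 ≤ b) : ∀ (n : Nat),
    (PySem.List.pyRange 0 (n : Int)).flatMap (fun j => (PySem.List.pyRange 0 b).map (g j))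
    = (PySem.List.pyRange 0 ((n : Int) * b)).map
        (fun t => g (PySem.Int.floordiv t b) (PySem.Int.mod t b)) := by
  intro n
  induction n with
  | zero => simp [PySem.List.pyRange_one_eq_nil]
  | succ n ih =>
      rcases eq_or_lt_of_le hb with hb0 | hbpos
      · simp [← hb0, PySem.List.pyRange_one_eq_nil]
      · have h1 : ((n + 1 : Nat) : Int) = (n : Int) + 1 := by push_cast; ring
        rw [h1, PySem.List.pyRange_one_succ_right (by positivity), List.flatMap_append, ih]
        have h2 : ((n : Int) + 1) * b = (n : Int) * b + b := by ring
        rw [h2, PySem.List.pyRange_one_append 0 ((n : Int) * b) ((n : Int) * b + b)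
              (by positivity) (by linarith), List.map_append]
        congr 1
        have hsh := pvRange_shift 0 b ((n : Int) * b)
        rw [zero_add] at hsh
        rw [show (n : Int) * b + b = b + (n : Int) * b by ring, ← hsh, List.map_map]
        simp only [List.flatMap_cons, List.flatMap_nil, List.append_nil]
        apply List.map_congr_left
        intro s hs
        obtain ⟨hs0, hs1⟩ := PySem.List.mem_pyRange_one.mp hs
        have hfd : PySem.Int.floordiv (s + (n : Int) * b) b = (n : Int) := by
          rw [PySem.Int.floordiv_eq_iff_of_pos hbpos]
          constructor <;> nlinarith
        have hmd : PySem.Int.mod (s + (n : Int) * b) b = s := by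
          rw [PySem.Int.mod_eq_emod_of_pos hbpos, mul_comm, Int.add_mul_emod_self_left]
          exact Int.emod_eq_of_lt hs0 hs1
        simp [Function.comp, hfd, hmd]

-- the same, stated over an Int upper bound
lemma pvFlatRange' (g : Int → Int → Int) (b a : Int) (hb : 0 ≤ b) (ha : 0 ≤ a) :
    (PySem.List.pyRange 0 a).flatMap (fun j => (PySem.List.pyRange 0 b).map (g j))
    = (PySem.List.pyRange 0 (a * b)).map
        (fun t => g (PySem.Int.floordiv t b) (PySem.Int.mod t b)) := by
  obtain ⟨n, rfl⟩ : ∃ n : Nat, a = (n : Int) := ⟨a.toNat, by omega⟩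
  exact pvFlatRange g b hb n

-- one inner segment in closed form
lemma pvSeg_closed (ne nj j x : Int) (hx0 : 0 ≤ x) (hx1 : x < ne) :
    pvSeg ne nj j x = (PySem.List.pyRange 0 (ne - 1)).map
      (fun yp => codage ne nj j x (if yp < x then yp else yp + 1)) := by
  unfold pvSeg
  have hfilter : (PySem.List.pyRange 0 ne).filter (fun y => decide (x ≠ y))
      = PySem.List.pyRange 0 x ++ PySem.List.pyRange (x + 1) ne := by
    rw [PySem.List.pyRange_one_append 0 x ne hx0 (le_of_lt hx1),
      PySem.List.pyRange_one_cons hx1, List.filter_append, List.filter_cons]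
    rw [if_neg (by simp), List.filter_eq_self.mpr ?_, List.filter_eq_self.mpr ?_]
    · intro y hy
      have := PySem.List.mem_pyRange_one.mp hy
      simp; omega
    · intro y hy
      have := PySem.List.mem_pyRange_one.mp hy
      simp; omega
  have hmap : (PySem.List.pyRange 0 (ne - 1)).map (fun yp => if yp < x then yp else yp + 1)
      = PySem.List.pyRange 0 x ++ PySem.List.pyRange (x + 1) ne := by
    rw [PySem.List.pyRange_one_append 0 x (ne - 1) hx0 (by omega), List.map_append]
    congr 1
    · rw [show PySem.List.pyRange 0 x = (PySem.List.pyRange 0 x).map id from (List.map_id _).symm]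
      rw [List.map_map]
      apply List.map_congr_left
      intro yp hyp
      have := PySem.List.mem_pyRange_one.mp hyp
      simp [if_pos this.2]
    · have hsh := pvRange_shift x (ne - 1) 1
      rw [show ne - 1 + 1 = ne by ring] at hsh
      rw [← hsh]
      apply List.map_congr_left
      intro yp hyp
      have := PySem.List.mem_pyRange_one.mp hyp
      rw [if_neg (by omega)]
  rw [show (fun yp => codage ne nj j x (if yp < x then yp else yp + 1))
        = (fun y => codage ne nj j x y) ∘ (fun yp => if yp < x then yp else yp + 1) from rfl,
    ← List.map_map, hmap, hfilter]

-- A's whole encoding list in closed (rank-decoded) form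
lemma pvL_closed (ne nj : Int) :
    pvL ne nj = (PySem.List.pyRange 0 (pvN ne nj)).map
      (fun t => code_of_rank ne (pvPer ne) (t + 1)) := by
  by_cases hnj : 0 < nj
  case neg =>
    unfold pvL pvN
    rw [if_neg hnj]
    simp [PySem.List.pyRange_one_eq_nil (by omega : nj ≤ (0:Int)),
      PySem.List.pyRange_one_eq_nil (le_refl (0:Int))]
  case pos =>
  by_cases hne : 2 ≤ ne
  case neg =>
    unfold pvL pvN pvPer
    by_cases hne1 : 0 < ne
    · have h1 : ne = 1 := by omega
      subst h1
      rw [if_pos hnj, if_pos hne1]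
      simp [pvSeg, PySem.List.pyRange_one_eq_nil, PySem.List.pyRange_one_cons (by norm_num : (0:Int) < 1)]
    · rw [if_neg hne1]
      simp [PySem.List.pyRange_one_eq_nil (by omega : ne ≤ (0:Int)),
        PySem.List.pyRange_one_eq_nil (le_refl (0:Int))]
  case pos =>
    have hper : pvPer ne = ne * (ne - 1) := by unfold pvPer; rw [if_pos (by omega)]
    have hN : pvN ne nj = nj * (ne * (ne - 1)) := by unfold pvN; rw [if_pos hnj, hper]
    unfold pvL
    -- inner: each j-block in closed form
    have hblock : ∀ j : Int,
        (PySem.List.pyRange 0 ne).flatMap (fun x => pvSeg ne nj j x)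
        = (PySem.List.pyRange 0 (ne * (ne - 1))).map (fun r =>
            codage ne nj j (PySem.Int.floordiv r (ne - 1))
              (if PySem.Int.mod r (ne - 1) < PySem.Int.floordiv r (ne - 1)
               then PySem.Int.mod r (ne - 1) else PySem.Int.mod r (ne - 1) + 1)) := by
      intro j
      have hcongr : (PySem.List.pyRange 0 ne).flatMap (fun x => pvSeg ne nj j x)
          = (PySem.List.pyRange 0 ne).flatMap (fun x => (PySem.List.pyRange 0 (ne - 1)).map
              (fun yp => codage ne nj j x (if yp < x then yp else yp + 1))) := by
        rw [List.flatMap_def, List.flatMap_def]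
        congr 1
        apply List.map_congr_left
        intro x hx
        have := PySem.List.mem_pyRange_one.mp hx
        exact pvSeg_closed ne nj j x this.1 this.2
      rw [hcongr]
      exact pvFlatRange' (fun x yp => codage ne nj j x (if yp < x then yp else yp + 1))
        (ne - 1) ne (by omega) (by omega)
    have hcongr2 : (PySem.List.pyRange 0 nj).flatMap
          (fun j => (PySem.List.pyRange 0 ne).flatMap (fun x => pvSeg ne nj j x))
        = (PySem.List.pyRange 0 nj).flatMap
          (fun j => (PySem.List.pyRange 0 (ne * (ne - 1))).map (fun r =>
            codage ne nj j (PySem.Int.floordiv r (ne - 1))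
              (if PySem.Int.mod r (ne - 1) < PySem.Int.floordiv r (ne - 1)
               then PySem.Int.mod r (ne - 1) else PySem.Int.mod r (ne - 1) + 1))) := by
      rw [List.flatMap_def, List.flatMap_def]
      congr 1
      apply List.map_congr_left
      intro j _
      exact hblock j
    rw [hcongr2,
      pvFlatRange' (fun j r =>
        codage ne nj j (PySem.Int.floordiv r (ne - 1))
          (if PySem.Int.mod r (ne - 1) < PySem.Int.floordiv r (ne - 1)
           then PySem.Int.mod r (ne - 1) else PySem.Int.mod r (ne - 1) + 1))
        (ne * (ne - 1)) nj (by nlinarith) (by omega)]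
    rw [hN]
    apply List.map_congr_left
    intro t _
    rw [hper]
    simp only [code_of_rank, codage, add_sub_cancel_right]
    ring

-- pvPairs over a mapped range, in closed form
lemma pvPairs_map_range (f : Int → Int) : ∀ (n : Nat) (a i : Int),
    pvPairs i ((PySem.List.pyRange a (a + (n : Int))).map f)
    = (PySem.List.pyRange a (a + (n : Int))).map (fun t => (i + (t - a), f t)) := by
  intro n
  induction n with
  | zero => intro a i; simp [pvPairs, PySem.List.pyRange_one_eq_nil]
  | succ n ih =>
      intro a i
      have hc : ((n + 1 : Nat) : Int) = (n : Int) + 1 := by push_cast; ring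
      rw [hc, PySem.List.pyRange_one_cons (by omega), List.map_cons, List.map_cons]
      simp only [pvPairs]
      congr 1
      · simp
      · rw [show a + ((n : Int) + 1) = (a + 1) + (n : Int) by ring, ih (a + 1) (i + 1)]
        apply List.map_congr_left
        intro t _
        refine Prod.ext ?_ rfl
        simp
        ring

-- the (rank, encoding) pairs B enumerates
lemma pvQ (ne nj : Int) :
    pvPairs 1 (pvL ne nj)
    = (PySem.List.pyRange 0 (pvN ne nj)).map
        (fun t => (t + 1, code_of_rank ne (pvPer ne) (t + 1))) := by
  rw [pvL_closed]
  have hN0 : 0 ≤ pvN ne nj := by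
    unfold pvN pvPer
    split_ifs with h1 h2
    · have : (0:Int) ≤ ne - 1 := by omega
      have := mul_nonneg (le_of_lt h2) this
      exact mul_nonneg (le_of_lt h1) this
    · simp
    · simp
    · simp
  obtain ⟨n, hn⟩ : ∃ n : Nat, pvN ne nj = (n : Int) := ⟨(pvN ne nj).toNat, by omega⟩
  rw [hn, show (n : Int) = 0 + (n : Int) by ring, pvPairs_map_range _ n 0 1]
  apply List.map_congr_left
  intro t _
  refine Prod.ext ?_ rfl
  simp
  ring

-- a fold of B's range loop is a fold over those pairs
lemma pvFoldQ (ne nj : Int) {σ : Type} (F : σ → Int × Int → σ) (init : σ) :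
    (PySem.List.pyRange 1 (pvN ne nj + 1)).foldl
      (fun s k => F s (k, code_of_rank ne (pvPer ne) k)) init
    = (pvPairs 1 (pvL ne nj)).foldl F init := by
  rw [pvQ, List.foldl_map]
  have hsh := pvRange_shift 0 (pvN ne nj) 1
  rw [zero_add] at hsh
  rw [← hsh, List.foldl_map]

lemma dico_alt_eq (ne nj : Int) : dico_alt ne nj = (pvC1 (pvL ne nj), pvC2 (pvL ne nj)) := by
  unfold dico_alt
  dsimp only
  rw [show (if 0 < ne then ne else 0) * ((if 0 < ne then ne else 0) - 1) = pvPer ne from rfl]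
  rw [show (if 0 < nj then nj else 0) * pvPer ne = pvN ne nj from rfl]
  rw [PySem.List.foldl_prod_mk
      (f := fun (d : PySem.Dict Int Int) k => d.insert k (code_of_rank ne (pvPer ne) k))
      (g := fun (d : PySem.Dict Int Int) k => d.insert (code_of_rank ne (pvPer ne) k) k)]
  rw [PySem.List.foldl_prod_mk
      (f := fun (d : PySem.Dict Int Int) k => d.insert (-k) (-(code_of_rank ne (pvPer ne) k)))
      (g := fun (d : PySem.Dict Int Int) k => d.insert (-(code_of_rank ne (pvPer ne) k)) (-k))]
  rw [pvFoldQ ne nj (F := fun (d : PySem.Dict Int Int) p => d.insert p.1 p.2),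
    pvFoldQ ne nj (F := fun (d : PySem.Dict Int Int) p => d.insert p.2 p.1),
    pvFoldQ ne nj (F := fun (d : PySem.Dict Int Int) p => d.insert (-p.1) (-p.2)),
    pvFoldQ ne nj (F := fun (d : PySem.Dict Int Int) p => d.insert (-p.2) (-p.1))]
  have hshift : pvPairs 1 (pvL ne nj) = (pvPairs 0 (pvL ne nj)).map (fun p => (p.1 + 1, p.2)) := by
    simpa using pvPairs_shift (pvL ne nj) 0
  rw [hshift]
  simp only [List.foldl_map]
  unfold pvC1 pvC2 pvD1pos pvD2pos
  have harith : ∀ a : Int, -(a + 1) = -a - 1 := fun a => by ring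
  rw [show (fun (x : PySem.Dict Int Int) (y : Int × Int) => x.insert (-(y.1 + 1)) (-y.2))
      = fun x y => x.insert (-y.1 - 1) (-y.2) from funext fun x => funext fun y => by rw [harith],
    show (fun (x : PySem.Dict Int Int) (y : Int × Int) => x.insert (-y.2) (-(y.1 + 1)))
      = fun x y => x.insert (-y.2) (-y.1 - 1) from funext fun x => funext fun y => by rw [harith]]

-- ===== VERDICT (by name: the statement is the Claim_ definition above) =====
theorem dico_spec : Claim_equal_dico := by
  intro ne nj _
  unfold Spec_dico
  rw [dico_eq, dico_alt_eq]
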